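-- pv_equiv track=rewrite | github.com/viktor-grunwaldt/wdp | lista01/zad3.py | krzyzyk1
-- ===== SOURCE A (Python) =====
-- krzyz = [
--     [" ", "*", " "],
--     ["*", "*", "*"],
--     [" ", "*", " "],
-- ]
--
-- def krzyzyk1(n: int) -> str:
--     img = ""
--     assert n >= 1
--     for i in range(3 * n):
--         for j in range(3 * n):
--             img += krzyz[i // n][j // n]
--
--         img += "\n"
--
--     return img
-- ===== SOURCE B (Python) =====
-- def krzyzyk1(n: int) -> str:
--     assert n >= 1
--     empty = " " * n + "*" * n + " " * n
--     full = "*" * (3 * n)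
--     rows = [empty] * n + [full] * n + [empty] * n
--     return "\n".join(rows) + "\n"
-- ===== Notes on version B (the rewrite author's own statement) =====
-- stated objective: simpler
-- what changed: Replaced the per-character double loop over the krzyz lookup table by direct construction of the two distinct row strings via string multiplication and a single join.
import Mathlib
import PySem

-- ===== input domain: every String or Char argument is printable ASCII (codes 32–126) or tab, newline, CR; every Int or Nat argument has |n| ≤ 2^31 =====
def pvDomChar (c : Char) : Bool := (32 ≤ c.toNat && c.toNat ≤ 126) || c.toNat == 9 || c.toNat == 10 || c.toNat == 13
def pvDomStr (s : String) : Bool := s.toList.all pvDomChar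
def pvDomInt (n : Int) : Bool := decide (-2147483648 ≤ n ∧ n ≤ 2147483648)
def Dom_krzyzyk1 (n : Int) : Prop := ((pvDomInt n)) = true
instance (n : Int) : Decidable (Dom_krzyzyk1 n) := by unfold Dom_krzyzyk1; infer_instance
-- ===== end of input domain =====

-- B drops the krzyz lookup table and the per-character nested loops: it builds the two
-- distinct row strings directly and joins n+n+n copies of them (objective: simpler).


-- ===== PORT A =====
-- Python strings are built as List Char (exact on this ASCII-only data); String.mk wraps at the end.
def krzyz : List (List (List Char)) :=
  [[[' '], ['*'], [' ']],
   [['*'], ['*'], ['*']],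
   [[' '], ['*'], [' ']]]

def krzyzyk1 (n : Int) : String :=
  -- "assert n >= 1": n < 1 raises AssertionError, excluded by Pre_krzyzyk1
  String.mk <|
    (PySem.List.pyRange 0 (3 * n)).foldl (fun img i =>
      ((PySem.List.pyRange 0 (3 * n)).foldl (fun img j =>
        img ++ PySem.List.pyGetD (PySem.List.pyGetD krzyz (PySem.Int.floordiv i n) [])
                 (PySem.Int.floordiv j n) []) img) ++ ['\n'])
      []

-- ===== PORT B =====
def krzyzyk1_alt (n : Int) : String :=
  let m := n.toNat
  let empty := List.replicate m ' ' ++ List.replicate m '*' ++ List.replicate m ' '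
  let full := List.replicate (3 * m) '*'
  let rows := List.replicate m empty ++ List.replicate m full ++ List.replicate m empty
  String.mk (PySem.Chars.join ['\n'] rows ++ ['\n'])

-- ===== PRECONDITION & SPEC =====
-- Python A's `assert n >= 1` raises AssertionError for n < 1.
def Pre_krzyzyk1 (n : Int) : Prop := 1 ≤ n
instance (n : Int) : Decidable (Pre_krzyzyk1 n) := by unfold Pre_krzyzyk1; infer_instance
def pvWitness_krzyzyk1 : Int := (2)

def Spec_krzyzyk1 (n : Int) (out : String) : Prop := out = krzyzyk1_alt n
instance (n : Int) (out : String) : Decidable (Spec_krzyzyk1 n out) := by unfold Spec_krzyzyk1; infer_instance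

-- ===== CLAIM (what is proved, stated in full; the proofs are below) =====
def Claim_equal_krzyzyk1 : Prop := ∀ (n : Int), Dom_krzyzyk1 n → Pre_krzyzyk1 n → Spec_krzyzyk1 n (krzyzyk1 n)

-- ===== LEMMAS AND PROOFS =====

-- a flatMap over range (3*m) whose function only depends on j / m splits into three constant blocks
theorem flatMap_range_three_div {α : Type} (m : Nat) (hm : 0 < m) (f : Nat → List α) :
    (List.range (3 * m)).flatMap (fun j => f (j / m)) =
      (List.replicate m (f 0)).flatten ++ (List.replicate m (f 1)).flatten ++
        (List.replicate m (f 2)).flatten := by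
  have h3 : 3 * m = m + (m + m) := by ring
  rw [h3, List.range_add, List.range_add]
  simp only [List.flatMap_append, List.flatMap_map]
  have seg : ∀ a : Nat, (List.range m).flatMap (fun x => f ((a * m + x) / m))
      = (List.replicate m (f a)).flatten := by
    intro a
    rw [List.flatMap_def]
    have hmap : (List.range m).map (fun x => f ((a * m + x) / m))
        = (List.range m).map (fun _ => f a) := by
      apply List.map_congr_left
      intro x hx
      have hx' : x < m := List.mem_range.mp hx
      congr 1
      rw [Nat.add_comm, Nat.mul_comm, Nat.add_mul_div_left _ _ hm, Nat.div_eq_of_lt hx', Nat.zero_add]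
    rw [hmap]
    simp [List.map_const']
  have s0 := seg 0; have s1 := seg 1; have s2 := seg 2
  simp only [Nat.zero_mul, Nat.zero_add] at s0
  rw [s0]
  have e1 : (List.range m).flatMap (fun x => f ((m + x) / m))
      = (List.replicate m (f 1)).flatten := by
    rw [← s1]; apply List.flatMap_congr; intro x _; congr 2; ring
  have e2 : (List.range m).flatMap (fun x => f ((m + (m + x)) / m))
      = (List.replicate m (f 2)).flatten := by
    rw [← s2]; apply List.flatMap_congr; intro x _; congr 2; ring
  rw [e1, e2, List.append_assoc]

theorem join_sep_append (sep : List Char) (rows : List (List Char)) (h : rows ≠ []) :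
    PySem.Chars.join sep rows ++ sep = rows.flatMap (fun r => r ++ sep) := by
  induction rows with
  | nil => simp at h
  | cons p rest ih =>
    cases rest with
    | nil => rw [PySem.Chars.join_singleton]; simp
    | cons q rest' =>
      rw [PySem.Chars.join_cons_cons, List.flatMap_cons, List.append_assoc, List.append_assoc,
        ih (by simp)]
      simp [List.append_assoc]

theorem krzyzyk1_eq_alt (n : Int) (hn : 1 ≤ n) : krzyzyk1 n = krzyzyk1_alt n := by
  obtain ⟨m, rfl⟩ : ∃ m : Nat, n = (m : Int) := ⟨n.toNat, (Int.toNat_of_nonneg (by omega)).symm⟩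
  have hm : 0 < m := by exact_mod_cast hn
  unfold krzyzyk1 krzyzyk1_alt
  have h3m : (3 : Int) * (m : Int) = ((3 * m : Nat) : Int) := by push_cast; ring
  rw [h3m, PySem.List.pyRange_zero_natCast, Int.toNat_natCast]
  congr 1
  -- reduce both folds over the casted range using floordiv_natCast / pyGetD_natCast
  have cast_cell : ∀ (a b : Nat),
      PySem.List.pyGetD (PySem.List.pyGetD krzyz (PySem.Int.floordiv (a : Int) (m : Int)) [])
        (PySem.Int.floordiv (b : Int) (m : Int)) []
      = (krzyz.getD (a / m) []).getD (b / m) [] := by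
    intro a b
    rw [PySem.Int.floordiv_natCast, PySem.Int.floordiv_natCast,
      PySem.List.pyGetD_natCast, PySem.List.pyGetD_natCast]
  -- the single row produced for a fixed outer index class q
  set g : Nat → Nat → List Char := fun q b => (krzyz.getD q []).getD b [] with hg
  have inner : ∀ (q : Nat) (acc : List Char),
      List.foldl (fun img j => img ++ g q (j / m)) acc (List.range (3 * m))
        = acc ++ (List.range (3 * m)).flatMap (fun j => g q (j / m)) :=
    fun q acc => PySem.List.foldl_append_eq_flatMap _ _ _
  -- rewrite outer fold over the mapped range
  rw [List.foldl_map]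
  have hbody : (fun (img : List Char) (i : Nat) =>
      (List.foldl (fun img j =>
        img ++ PySem.List.pyGetD (PySem.List.pyGetD krzyz (PySem.Int.floordiv (i : Int) (m : Int)) [])
          (PySem.Int.floordiv j (m : Int)) []) img ((List.range (3 * m)).map (fun (k : Nat) => (k : Int))))
        ++ ['\n'])
      = fun img i =>
          img ++ ((List.range (3 * m)).flatMap (fun j => g (i / m) (j / m)) ++ ['\n']) := by
    funext img i
    rw [List.foldl_map]
    have hc : (fun (img : List Char) (j : Nat) =>
        img ++ PySem.List.pyGetD (PySem.List.pyGetD krzyz (PySem.Int.floordiv (i : Int) (m : Int)) [])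
          (PySem.Int.floordiv (j : Int) (m : Int)) []) = fun img j => img ++ g (i / m) (j / m) := by
      funext img j; rw [cast_cell]
    rw [hc, inner, List.append_assoc]
  rw [hbody]
  rw [PySem.List.foldl_append_eq_flatMap, List.nil_append]
  -- row contents for each class
  have row : ∀ q : Nat,
      (List.range (3 * m)).flatMap (fun j => g q (j / m)) =
        (List.replicate m (g q 0)).flatten ++ (List.replicate m (g q 1)).flatten ++
          (List.replicate m (g q 2)).flatten :=
    fun q => flatMap_range_three_div m hm (g q)
  -- A side: split the outer flatMap into three blocks
  rw [flatMap_range_three_div m hm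
    (fun q => (List.range (3 * m)).flatMap (fun j => g q (j / m)) ++ ['\n'])]
  -- B side: turn join ++ sep into a flatMap
  rw [join_sep_append ['\n'] _ (by
    intro h
    have : m ≠ 0 := hm.ne'
    simp [List.replicate_eq_nil_iff, this] at h)]
  simp only [List.flatMap_append, List.flatMap_replicate]
  -- identify the three row strings
  rw [row 0, row 1, row 2]
  simp only [hg, krzyz, List.getD, List.getElem?_cons_zero, List.getElem?_cons_succ,
    Option.getD_some, List.flatten_replicate_singleton]
  have hfull : List.replicate m '*' ++ List.replicate m '*' ++ List.replicate m '*'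
      = List.replicate (3 * m) '*' := by
    rw [← List.replicate_add, ← List.replicate_add]; congr 1; ring
  rw [hfull]

-- ===== VERDICT (by name: the statement is the Claim_ definition above) =====
theorem krzyzyk1_spec : Claim_equal_krzyzyk1 := by
  intro n _ hpre
  unfold Spec_krzyzyk1
  exact krzyzyk1_eq_alt n hpre
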